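-- pv_equiv track=rewrite | github.com/petrpavlu/storepass | storepass/model.py | path_element_to_string
-- ===== SOURCE A (Python) =====
-- def path_element_to_string(path_element):
--     """Convert a single path element to its escaped string representation."""
--     res = ""
--     for char in path_element:
--         if char == '\\':
--             res += "\\\\"
--         elif char == '/':
--             res += "\\/"
--         else:
--             res += char
--     return res
-- ===== SOURCE B (Python) =====
-- def path_element_to_string(path_element):
--     """Convert a single path element to its escaped string representation."""
--     return path_element.replace("\\", "\\\\").replace("/", "\\/")
-- ===== Notes on version B (the rewrite author's own statement) =====
-- stated objective: idiomatic
-- what changed: Replaces the explicit per-character branching loop with two sequential str.replace passes (backslash first, then slash), the standard-library way to escape characters.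
import Mathlib
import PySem

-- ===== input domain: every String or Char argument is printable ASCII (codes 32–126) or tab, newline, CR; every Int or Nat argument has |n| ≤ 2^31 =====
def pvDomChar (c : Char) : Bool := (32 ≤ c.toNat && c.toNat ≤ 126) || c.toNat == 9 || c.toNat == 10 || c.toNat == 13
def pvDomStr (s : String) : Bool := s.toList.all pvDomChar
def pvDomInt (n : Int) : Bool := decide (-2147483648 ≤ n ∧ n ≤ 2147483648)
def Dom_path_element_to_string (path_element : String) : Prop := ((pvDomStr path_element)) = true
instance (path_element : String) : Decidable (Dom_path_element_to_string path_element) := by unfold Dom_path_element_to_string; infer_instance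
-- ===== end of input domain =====

-- B replaces A's per-character branching loop with two sequential str.replace passes (idiomatic).

-- ===== PORT A =====
def path_element_to_string (path_element : String) : String :=
  path_element.toList.foldl
    (fun res c =>
      if c = '\\' then res ++ "\\\\"
      else if c = '/' then res ++ "\\/"
      else res ++ String.ofList [c]) ""

-- ===== PORT B =====
def path_element_to_string_alt (path_element : String) : String :=
  PySem.Str.replace (PySem.Str.replace path_element "\\" "\\\\") "/" "\\/"

-- ===== PRECONDITION & SPEC =====
def Spec_path_element_to_string (path_element : String) (out : String) : Prop := out = path_element_to_string_alt path_element
instance (path_element : String) (out : String) : Decidable (Spec_path_element_to_string path_element out) := by unfold Spec_path_element_to_string; infer_instance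

-- ===== CLAIM (what is proved, stated in full; the proofs are below) =====
def Claim_equal_path_element_to_string : Prop := ∀ (path_element : String), Dom_path_element_to_string path_element → Spec_path_element_to_string path_element (path_element_to_string path_element)

-- ===== LEMMAS AND PROOFS =====

-- single-character `old`: replace.go is a per-character substitution
theorem pvGoSingle (o : Char) (new : List Char) :
    ∀ (cs acc : List Char) (fuel : Nat), cs.length ≤ fuel →
      PySem.Chars.replace.go [o] new fuel cs acc =
        acc.reverse ++ cs.flatMap (fun c => if c = o then new else [c]) := by
  intro cs
  induction cs with
  | nil =>
      intro acc fuel _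
      cases fuel <;> simp [PySem.Chars.replace.go]
  | cons c t ih =>
      intro acc fuel hf
      cases fuel with
      | zero => simp at hf
      | succ fuel =>
        by_cases h : c = o
        · have hpre : List.isPrefixOf [o] (c :: t) = true := by
            simp [List.isPrefixOf]
            exact h.symm
          rw [PySem.Chars.replace.go, if_pos hpre]
          simp only [List.length_cons] at hf
          rw [show List.drop (List.length [o]) (c :: t) = t by simp]
          rw [ih (new.reverse ++ acc) fuel (Nat.le_of_succ_le_succ hf)]
          simp [h]
        · have hpre : List.isPrefixOf [o] (c :: t) = false := by
            simp [List.isPrefixOf]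
            exact fun hh => h hh.symm
          rw [PySem.Chars.replace.go, if_neg (by simp [hpre])]
          simp only [List.length_cons] at hf
          rw [ih (c :: acc) fuel (Nat.le_of_succ_le_succ hf)]
          simp [h]

theorem pvReplaceSingle (o : Char) (new cs : List Char) :
    PySem.Chars.replace cs [o] new = cs.flatMap (fun c => if c = o then new else [c]) := by
  rw [PySem.Chars.replace]
  simp only [List.isEmpty_cons, Bool.false_eq_true, if_false]
  simpa using pvGoSingle o new cs [] cs.length le_rfl

theorem pvFlatMapAssoc {α β γ : Type} (l : List α) (f : α → List β) (g : β → List γ) :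
    (l.flatMap f).flatMap g = l.flatMap (fun x => (f x).flatMap g) := by
  induction l with
  | nil => rfl
  | cons a t ih => simp [List.flatMap_cons, ih]

-- A's loop, read off on the character list
theorem pvFoldlToList (cs : List Char) :
    ∀ (init : String),
      (cs.foldl (fun res c =>
        if c = '\\' then res ++ "\\\\"
        else if c = '/' then res ++ "\\/"
        else res ++ String.ofList [c]) init).toList =
      init.toList ++ cs.flatMap (fun c =>
        if c = '\\' then ['\\', '\\'] else if c = '/' then ['\\', '/'] else [c]) := by
  induction cs with
  | nil => intro init; simp
  | cons c t ih =>
      intro init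
      by_cases h1 : c = '\\'
      · simp [h1, ih]
      · by_cases h2 : c = '/'
        · simp [h2, ih]
        · simp [h1, h2, ih]

-- ===== VERDICT (by name: the statement is the Claim_ definition above) =====
theorem path_element_to_string_spec : Claim_equal_path_element_to_string := by
  intro s _
  show path_element_to_string s = path_element_to_string_alt s
  have hto : (path_element_to_string s).toList = (path_element_to_string_alt s).toList := by
    rw [path_element_to_string, path_element_to_string_alt, pvFoldlToList]
    rw [PySem.Str.toList_replace, PySem.Str.toList_replace]
    rw [show ("\\" : String).toList = ['\\'] from rfl,
        show ("\\\\" : String).toList = ['\\', '\\'] from rfl,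
        show ("/" : String).toList = ['/'] from rfl,
        show ("\\/" : String).toList = ['\\', '/'] from rfl]
    rw [pvReplaceSingle, pvReplaceSingle, pvFlatMapAssoc]
    simp only [String.toList_empty, List.nil_append]
    apply List.flatMap_congr
    intro c _
    by_cases h1 : c = '\\'
    · simp [h1]
    · by_cases h2 : c = '/' <;> simp [h1, h2]
  exact String.toList_inj.mp hto
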